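-- pv_equiv track=rewrite | github.com/gary-butler/NEAT | hybrid_NEAT_1.02_beta.py | num_excess_genes
-- ===== SOURCE A (Python) =====
-- def num_excess_genes(a_nodes = [], a_connects = [], b_nodes = [], b_connects = []):
--     """
--     excess genes are defined as the extra genes found in the middle sections of two
--     compared genomes, used for calculating the distance between the two genomes
--     first we find the highest matching gene, then we sum the non matching genes
--     between the beginning of each genome and the highest matching gene
--     num
--     """
--     num_e = 0
--     highest_match = 0
--     for a_node in a_nodes:
--         for b_node in b_nodes:
--             if (a_node[0] == b_node[0]):
--                 highest_match = max(highest_match, a_node[0])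
--     for a_connect in a_connects:
--         for b_connect in b_connects:
--             if (a_connect[0] == b_connect[0]):
--                 highest_match = max(highest_match, a_connect[0])
--     for a_node in a_nodes:
--         if(a_node[0] > highest_match):
--             num_e += 1
--     for b_node in b_nodes:
--         if(b_node[0] > highest_match):
--             num_e += 1
--     for a_connect in a_connects:
--         if(a_connect[0] > highest_match):
--             num_e += 1
--     for b_connect in b_connects:
--         if(b_connect[0] > highest_match):
--             num_e += 1
--     return num_e
-- ===== SOURCE B (Python) =====
-- def num_excess_genes(a_nodes = [], a_connects = [], b_nodes = [], b_connects = []):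
--     a_node_ids = {x[0] for x in a_nodes}
--     b_node_ids = {x[0] for x in b_nodes}
--     a_conn_ids = {x[0] for x in a_connects}
--     b_conn_ids = {x[0] for x in b_connects}
--     highest_match = max([0, *(a_node_ids & b_node_ids), *(a_conn_ids & b_conn_ids)])
--     return sum(1 for genes in (a_nodes, b_nodes, a_connects, b_connects)
--                  for g in genes if g[0] > highest_match)
-- ===== Notes on version B (the rewrite author's own statement) =====
-- stated objective: faster
-- what changed: Replaces the two quadratic nested loops that scan every (a,b) pair for matching gene ids with hash sets of ids intersected once, then one linear counting pass over the four lists.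
import Mathlib
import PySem

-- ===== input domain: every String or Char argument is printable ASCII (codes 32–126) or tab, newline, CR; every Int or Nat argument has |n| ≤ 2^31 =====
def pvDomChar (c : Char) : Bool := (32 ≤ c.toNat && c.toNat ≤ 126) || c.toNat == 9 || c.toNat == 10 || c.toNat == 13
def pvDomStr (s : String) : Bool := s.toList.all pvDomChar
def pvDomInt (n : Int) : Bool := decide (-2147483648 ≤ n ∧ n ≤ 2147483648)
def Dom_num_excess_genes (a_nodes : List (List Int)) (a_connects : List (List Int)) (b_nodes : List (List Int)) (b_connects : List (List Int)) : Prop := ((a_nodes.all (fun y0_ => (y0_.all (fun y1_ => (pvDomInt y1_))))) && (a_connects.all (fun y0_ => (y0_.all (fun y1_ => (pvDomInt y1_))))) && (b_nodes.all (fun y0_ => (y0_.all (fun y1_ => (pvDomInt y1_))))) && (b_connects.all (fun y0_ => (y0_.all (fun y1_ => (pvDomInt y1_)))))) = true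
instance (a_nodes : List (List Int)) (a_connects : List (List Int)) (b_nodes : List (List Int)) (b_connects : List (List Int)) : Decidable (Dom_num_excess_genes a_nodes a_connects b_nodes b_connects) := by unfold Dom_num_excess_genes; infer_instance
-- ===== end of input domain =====

-- ===== PORT A =====
-- B replaces A's quadratic pairwise id-matching with hash-set intersection and one counting pass (faster, asymptotic).
-- Pre_ excludes inputs containing an empty inner list, where both A and B raise IndexError on g[0].
def num_excess_genes (a_nodes : List (List Int)) (a_connects : List (List Int)) (b_nodes : List (List Int)) (b_connects : List (List Int)) : Int :=
  let hm1 : Int := a_nodes.foldl (fun h a =>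
      b_nodes.foldl (fun h2 b => if a.headD 0 = b.headD 0 then max h2 (a.headD 0) else h2) h) 0
  let hm : Int := a_connects.foldl (fun h a =>
      b_connects.foldl (fun h2 b => if a.headD 0 = b.headD 0 then max h2 (a.headD 0) else h2) h) hm1
  let n1 : Int := a_nodes.foldl (fun n a => if a.headD 0 > hm then n + 1 else n) 0
  let n2 : Int := b_nodes.foldl (fun n b => if b.headD 0 > hm then n + 1 else n) n1
  let n3 : Int := a_connects.foldl (fun n c => if c.headD 0 > hm then n + 1 else n) n2
  let n4 : Int := b_connects.foldl (fun n c => if c.headD 0 > hm then n + 1 else n) n3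
  n4

-- ===== PORT B =====
def num_excess_genes_alt (a_nodes : List (List Int)) (a_connects : List (List Int)) (b_nodes : List (List Int)) (b_connects : List (List Int)) : Int :=
  let a_node_ids : PySem.Set Int := PySem.Set.ofList (a_nodes.map (fun x => x.headD 0))
  let b_node_ids : PySem.Set Int := PySem.Set.ofList (b_nodes.map (fun x => x.headD 0))
  let a_conn_ids : PySem.Set Int := PySem.Set.ofList (a_connects.map (fun x => x.headD 0))
  let b_conn_ids : PySem.Set Int := PySem.Set.ofList (b_connects.map (fun x => x.headD 0))
  -- max([0, *s1, *s2]) : order-independent consumption of the sets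
  let highest_match : Int :=
    ((PySem.Set.inter a_node_ids b_node_ids) ++ (PySem.Set.inter a_conn_ids b_conn_ids)).foldl max 0
  ((a_nodes ++ b_nodes ++ a_connects ++ b_connects).countP (fun g => g.headD 0 > highest_match) : Int)

-- ===== PRECONDITION & SPEC =====
-- Pre_ excludes exactly the inputs with an empty inner list, on which Python A raises IndexError (B raises too).
def Pre_num_excess_genes (a_nodes : List (List Int)) (a_connects : List (List Int)) (b_nodes : List (List Int)) (b_connects : List (List Int)) : Prop :=
  (∀ l ∈ a_nodes, l ≠ []) ∧ (∀ l ∈ a_connects, l ≠ []) ∧ (∀ l ∈ b_nodes, l ≠ []) ∧ (∀ l ∈ b_connects, l ≠ [])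
instance (a_nodes : List (List Int)) (a_connects : List (List Int)) (b_nodes : List (List Int)) (b_connects : List (List Int)) : Decidable (Pre_num_excess_genes a_nodes a_connects b_nodes b_connects) := by unfold Pre_num_excess_genes; infer_instance
def pvWitness_num_excess_genes : List (List Int) × List (List Int) × List (List Int) × List (List Int) :=
  ([[1, 0], [3, 1]], [[2, 0]], [[1, 2], [4, 0]], [[2, 1], [5, 0]])
def Spec_num_excess_genes (a_nodes : List (List Int)) (a_connects : List (List Int)) (b_nodes : List (List Int)) (b_connects : List (List Int)) (out : Int) : Prop := out = num_excess_genes_alt a_nodes a_connects b_nodes b_connects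
instance (a_nodes : List (List Int)) (a_connects : List (List Int)) (b_nodes : List (List Int)) (b_connects : List (List Int)) (out : Int) : Decidable (Spec_num_excess_genes a_nodes a_connects b_nodes b_connects out) := by unfold Spec_num_excess_genes; infer_instance

-- ===== CLAIM (what is proved, stated in full; the proofs are below) =====
def Claim_equal_num_excess_genes : Prop := ∀ (a_nodes : List (List Int)) (a_connects : List (List Int)) (b_nodes : List (List Int)) (b_connects : List (List Int)), Dom_num_excess_genes a_nodes a_connects b_nodes b_connects → Pre_num_excess_genes a_nodes a_connects b_nodes b_connects → Spec_num_excess_genes a_nodes a_connects b_nodes b_connects (num_excess_genes a_nodes a_connects b_nodes b_connects)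

-- ===== LEMMAS AND PROOFS =====

-- inner loop of A: scan bs for a match with x, taking max with x on each hit
theorem pv_inner_eq (x : Int) (bs : List Int) (h : Int) :
    bs.foldl (fun h2 b => if x = b then max h2 x else h2) h
      = if x ∈ bs then max h x else h := by
  induction bs generalizing h with
  | nil => simp
  | cons b bs ih =>
    simp only [List.foldl_cons, List.mem_cons]
    by_cases hxb : x = b
    · subst hxb
      rw [if_pos rfl, ih]
      by_cases hm : x ∈ bs <;> simp [hm]
    · rw [if_neg hxb, ih]
      simp [hxb]

-- outer loop of A: fold of the conditional max = foldl max over the filtered list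
theorem pv_outer_eq (xs bs : List Int) (h : Int) :
    xs.foldl (fun h2 x => if x ∈ bs then max h2 x else h2) h
      = (xs.filter (fun x => x ∈ bs)).foldl max h := by
  induction xs generalizing h with
  | nil => rfl
  | cons x xs ih =>
    by_cases hx : x ∈ bs <;> simp [hx, ih]

theorem pv_le_foldl_max (l : List Int) (h : Int) : h ≤ l.foldl max h := by
  induction l generalizing h with
  | nil => exact le_refl h
  | cons x l ih => exact le_trans (le_max_left h x) (ih (max h x))

theorem pv_mem_le_foldl_max (l : List Int) (h x : Int) : x ∈ l → x ≤ l.foldl max h := by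
  induction l generalizing h with
  | nil => intro hx; cases hx
  | cons y l ih =>
    intro hx
    rcases List.mem_cons.mp hx with rfl | hx'
    · exact le_trans (le_max_right h x) (pv_le_foldl_max l (max h x))
    · exact ih (max h y) hx'

theorem pv_foldl_max_le (l : List Int) (h c : Int) (hh : h ≤ c) (hl : ∀ x ∈ l, x ≤ c) :
    l.foldl max h ≤ c := by
  induction l generalizing h with
  | nil => exact hh
  | cons x l ih =>
    exact ih (max h x) (max_le hh (hl x List.mem_cons_self))
      (fun y hy => hl y (List.mem_cons_of_mem _ hy))

-- foldl max depends only on the membership set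
theorem pv_foldl_max_congr (l₁ l₂ : List Int) (h : Int) (hmem : ∀ x, x ∈ l₁ ↔ x ∈ l₂) :
    l₁.foldl max h = l₂.foldl max h := by
  apply le_antisymm
  · exact pv_foldl_max_le l₁ h _ (pv_le_foldl_max l₂ h)
      (fun x hx => pv_mem_le_foldl_max l₂ h x ((hmem x).mp hx))
  · exact pv_foldl_max_le l₂ h _ (pv_le_foldl_max l₁ h)
      (fun x hx => pv_mem_le_foldl_max l₁ h x ((hmem x).mpr hx))

-- a counting fold = starting value + countP
theorem pv_foldl_count (P : List Int → Prop) [DecidablePred P] (l : List (List Int)) (s : Int) :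
    l.foldl (fun n a => if P a then n + 1 else n) s
      = s + (l.countP (fun a => decide (P a)) : Int) := by
  induction l generalizing s with
  | nil => simp
  | cons x l ih =>
    by_cases hx : P x
    · simp [hx, ih]; ring
    · simp [hx, ih]

-- List.foldl_map with explicit arguments (so it can be cited in a rewrite)
theorem pv_foldl_map {α β γ : Type} (f : β → γ) (g : α → γ → α) (l : List β) (i : α) :
    (l.map f).foldl g i = l.foldl (fun x y => g x (f y)) i := List.foldl_map ..

-- A's nested matching fold, rewritten over the lists of head values
theorem pv_hm_eq (as bs : List (List Int)) (h : Int) :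
    as.foldl (fun h1 a => bs.foldl (fun h2 b => if a.headD 0 = b.headD 0 then max h2 (a.headD 0) else h2) h1) h
      = ((as.map (fun x => x.headD 0)).filter (fun x => x ∈ bs.map (fun x => x.headD 0))).foldl max h := by
  have hfun : (fun h1 (a : List Int) => bs.foldl (fun h2 b => if a.headD 0 = b.headD 0 then max h2 (a.headD 0) else h2) h1)
      = (fun h1 (a : List Int) => if a.headD 0 ∈ bs.map (fun x => x.headD 0) then max h1 (a.headD 0) else h1) := by
    funext h1 a
    rw [← pv_foldl_map (fun x : List Int => x.headD 0)
          (fun h2 b => if a.headD 0 = b then max h2 (a.headD 0) else h2), pv_inner_eq]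
  rw [hfun,
    ← pv_foldl_map (fun x : List Int => x.headD 0)
        (fun h1 x => if x ∈ bs.map (fun y : List Int => y.headD 0) then max h1 x else h1),
    pv_outer_eq]

-- the four chained counting loops of A = one countP over the concatenation
theorem pv_counts (hm : Int) (an bn ac bc : List (List Int)) :
    bc.foldl (fun n c => if c.headD 0 > hm then n + 1 else n)
      (ac.foldl (fun n c => if c.headD 0 > hm then n + 1 else n)
        (bn.foldl (fun n b => if b.headD 0 > hm then n + 1 else n)
          (an.foldl (fun n a => if a.headD 0 > hm then n + 1 else n) 0)))
      = ((an ++ bn ++ ac ++ bc).countP (fun g => g.headD 0 > hm) : Int) := by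
  rw [pv_foldl_count, pv_foldl_count, pv_foldl_count, pv_foldl_count]
  simp [List.countP_append]
  ring

theorem num_excess_genes_spec_aux (a_nodes a_connects b_nodes b_connects : List (List Int)) :
    num_excess_genes a_nodes a_connects b_nodes b_connects
      = num_excess_genes_alt a_nodes a_connects b_nodes b_connects := by
  unfold num_excess_genes num_excess_genes_alt
  dsimp only
  rw [pv_hm_eq, pv_hm_eq, pv_counts]
  have hmeq :
      List.foldl max
          (List.foldl max 0 ((a_nodes.map (fun x => x.headD 0)).filter
            (fun x => x ∈ b_nodes.map (fun x => x.headD 0))))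
          ((a_connects.map (fun x => x.headD 0)).filter
            (fun x => x ∈ b_connects.map (fun x => x.headD 0)))
        = ((PySem.Set.inter (PySem.Set.ofList (a_nodes.map (fun x => x.headD 0)))
              (PySem.Set.ofList (b_nodes.map (fun x => x.headD 0)))) ++
           (PySem.Set.inter (PySem.Set.ofList (a_connects.map (fun x => x.headD 0)))
              (PySem.Set.ofList (b_connects.map (fun x => x.headD 0))))).foldl max 0 := by
    rw [← List.foldl_append]
    exact pv_foldl_max_congr _ _ 0
      (fun x => by simp [PySem.Set.mem_inter, PySem.Set.mem_ofList, List.mem_filter])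
  rw [hmeq]

-- ===== VERDICT (by name: the statement is the Claim_ definition above) =====
theorem num_excess_genes_spec : Claim_equal_num_excess_genes := by
  intro a_nodes a_connects b_nodes b_connects _ _
  unfold Spec_num_excess_genes
  exact num_excess_genes_spec_aux a_nodes a_connects b_nodes b_connects
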